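-- pv_equiv track=rewrite | github.com/phuongmt3/Vietnamese-Graph-Summarization | Frozen_Fusion_infer.py | track_changes
-- ===== SOURCE A (Python) =====
-- def track_changes(old_words, new_words):
--     # Find the longest common subsequence (LCS) between the two word sequences
--     def get_lcs_matrix(words1, words2):
--         m, n = len(words1), len(words2)
--         dp = [[0] * (n + 1) for _ in range(m + 1)]
--
--         for i in range(1, m + 1):
--             for j in range(1, n + 1):
--                 if words1[i-1] == words2[j-1]:
--                     dp[i][j] = dp[i-1][j-1] + 1
--                 else:
--                     dp[i][j] = max(dp[i-1][j], dp[i][j-1])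
--
--         return dp
--
--     def get_lcs(words1, words2, dp):
--         i, j = len(words1), len(words2)
--         lcs = []
--
--         while i > 0 and j > 0:
--             if words1[i-1] == words2[j-1]:
--                 lcs.append((i-1, j-1))
--                 i -= 1
--                 j -= 1
--             elif dp[i-1][j] > dp[i][j-1]:
--                 i -= 1
--             else:
--                 j -= 1
--
--         return sorted(lcs)
--
--     # Find the changed segments at word level
--     dp_matrix = get_lcs_matrix(old_words, new_words)
--     lcs_positions = get_lcs(old_words, new_words, dp_matrix)
--
--     changes = []
--     old_pos = 0
--     new_pos = 0
--
--     # Process matching and non-matching segments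
--     for old_idx, new_idx in lcs_positions:
--         # If there's a gap before this match, it's a change
--         if old_idx > old_pos or new_idx > new_pos:
--             changes.append((old_pos, old_idx, new_pos, new_idx))
--
--         # Move positions after the match
--         old_pos = old_idx + 1
--         new_pos = new_idx + 1
--
--     # Check if there's a change at the end
--     if old_pos < len(old_words) or new_pos < len(new_words):
--         changes.append((old_pos, len(old_words), new_pos, len(new_words)))
--
--     return changes
-- ===== SOURCE B (Python) =====
-- def track_changes(old_words, new_words):
--     # Same LCS dp matrix and tie-break as before, but segments are emitted
--     # directly during the backtracking walk (back-to-front, reversed at the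
--     # end) instead of collecting match pairs, sorting them and running a
--     # separate forward segment loop.
--     m, n = len(old_words), len(new_words)
--     dp = [[0] * (n + 1) for _ in range(m + 1)]
--     for i in range(1, m + 1):
--         for j in range(1, n + 1):
--             if old_words[i-1] == new_words[j-1]:
--                 dp[i][j] = dp[i-1][j-1] + 1
--             else:
--                 dp[i][j] = max(dp[i-1][j], dp[i][j-1])
--
--     changes = []
--     i, j = m, n
--     right_old, right_new = m, n
--     while i > 0 and j > 0:
--         if old_words[i-1] == new_words[j-1]:
--             if i < right_old or j < right_new:
--                 changes.append((i, right_old, j, right_new))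
--             right_old, right_new = i - 1, j - 1
--             i -= 1
--             j -= 1
--         elif dp[i-1][j] > dp[i][j-1]:
--             i -= 1
--         else:
--             j -= 1
--     if right_old > 0 or right_new > 0:
--         changes.append((0, right_old, 0, right_new))
--     changes.reverse()
--     return changes
-- ===== Notes on version B (the rewrite author's own statement) =====
-- stated objective: alternative
-- what changed: Segment emission is fused into the LCS backtracking walk (segments emitted back-to-front against a moving right boundary and reversed at the end), eliminating the collected match-pair list, the sort, and the separate forward segment loop.
import Mathlib
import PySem

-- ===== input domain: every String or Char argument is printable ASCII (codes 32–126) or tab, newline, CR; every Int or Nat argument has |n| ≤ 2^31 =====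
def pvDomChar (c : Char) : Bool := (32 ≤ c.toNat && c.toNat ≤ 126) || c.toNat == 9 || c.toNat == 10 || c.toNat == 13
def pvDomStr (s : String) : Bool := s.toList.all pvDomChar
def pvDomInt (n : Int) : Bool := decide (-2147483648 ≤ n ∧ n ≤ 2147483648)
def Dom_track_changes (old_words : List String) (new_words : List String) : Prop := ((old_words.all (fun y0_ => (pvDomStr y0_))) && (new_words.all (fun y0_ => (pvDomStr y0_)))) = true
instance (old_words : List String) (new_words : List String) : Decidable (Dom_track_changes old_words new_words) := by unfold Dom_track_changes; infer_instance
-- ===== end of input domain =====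

-- B fuses segment emission into the LCS backtracking walk (same dp matrix and
-- tie-break), removing the collected match list, the sort and the separate
-- forward segment loop; objective: alternative (same O(mn) cost).

-- ===== PORT A =====
-- get_lcs_matrix: the dp table built by the literal double loop (indices always in range)
def lcsMatrix (w1 w2 : List String) : List (List Nat) :=
  let m := w1.length
  let n := w2.length
  let dp0 := List.replicate (m+1) (List.replicate (n+1) 0)
  (List.range' 1 m).foldl (fun dp i =>
    (List.range' 1 n).foldl (fun dp j =>
      let v := if w1.getD (i-1) "" == w2.getD (j-1) "" then
                 ((dp.getD (i-1) []).getD (j-1) 0) + 1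
               else
                 max ((dp.getD (i-1) []).getD j 0) ((dp.getD i []).getD (j-1) 0)
      dp.set i ((dp.getD i []).set j v)) dp) dp0

-- get_lcs's while loop, producing the matched index pairs in visit order (before sorted)
def getLcsAux (w1 w2 : List String) (dp : List (List Nat)) : Nat → Nat → List (Nat × Nat)
  | i+1, j+1 =>
    if w1.getD i "" == w2.getD j "" then
      (i, j) :: getLcsAux w1 w2 dp i j
    else if (dp.getD i []).getD (j+1) 0 > (dp.getD (i+1) []).getD j 0 then
      getLcsAux w1 w2 dp i (j+1)
    else
      getLcsAux w1 w2 dp (i+1) j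
  | 0, _ => []
  | _+1, 0 => []
  termination_by i j => i + j
  decreasing_by all_goals omega

-- the forward loop body over (old_idx, new_idx); state = (changes, old_pos, new_pos)
def fwdStep (acc : List (Int × Int × Int × Int) × Nat × Nat) (p : Nat × Nat) :
    List (Int × Int × Int × Int) × Nat × Nat :=
  let changes := if p.1 > acc.2.1 ∨ p.2 > acc.2.2 then
                   acc.1 ++ [((acc.2.1 : Int), (p.1 : Int), (acc.2.2 : Int), (p.2 : Int))]
                 else acc.1
  (changes, p.1 + 1, p.2 + 1)

-- sorted(lcs): key (·.1) is exact here, the pairs' first components are pairwise distinct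
def track_changes (old_words : List String) (new_words : List String) : List (Int × Int × Int × Int) :=
  let dp := lcsMatrix old_words new_words
  let lcs := PySem.List.sorted (getLcsAux old_words new_words dp old_words.length new_words.length)
               (fun p => p.1) false
  let st := lcs.foldl fwdStep ([], 0, 0)
  st.1 ++ (if st.2.1 < old_words.length ∨ st.2.2 < new_words.length then
             [((st.2.1 : Int), (old_words.length : Int), (st.2.2 : Int), (new_words.length : Int))]
           else [])

-- ===== PORT B =====
-- the backward walk: boundaries (ro, rn), segments emitted in walk order
def walkEmit (w1 w2 : List String) (dp : List (List Nat)) :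
    Nat → Nat → Nat → Nat → List (Int × Int × Int × Int)
  | i+1, j+1, ro, rn =>
    if w1.getD i "" == w2.getD j "" then
      (if i+1 < ro ∨ j+1 < rn then [((i : Int)+1, (ro : Int), (j : Int)+1, (rn : Int))] else []) ++
        walkEmit w1 w2 dp i j i j
    else if (dp.getD i []).getD (j+1) 0 > (dp.getD (i+1) []).getD j 0 then
      walkEmit w1 w2 dp i (j+1) ro rn
    else
      walkEmit w1 w2 dp (i+1) j ro rn
  | 0, _, ro, rn => if 0 < ro ∨ 0 < rn then [(0, (ro : Int), 0, (rn : Int))] else []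
  | _+1, 0, ro, rn => if 0 < ro ∨ 0 < rn then [(0, (ro : Int), 0, (rn : Int))] else []
  termination_by i j _ _ => i + j
  decreasing_by all_goals omega

def track_changes_alt (old_words : List String) (new_words : List String) : List (Int × Int × Int × Int) :=
  let dp := lcsMatrix old_words new_words
  (walkEmit old_words new_words dp old_words.length new_words.length
     old_words.length new_words.length).reverse

-- ===== PRECONDITION & SPEC =====
def Spec_track_changes (old_words : List String) (new_words : List String) (out : List (Int × Int × Int × Int)) : Prop := out = track_changes_alt old_words new_words
instance (old_words : List String) (new_words : List String) (out : List (Int × Int × Int × Int)) : Decidable (Spec_track_changes old_words new_words out) := by unfold Spec_track_changes; infer_instance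

-- ===== CLAIM (what is proved, stated in full; the proofs are below) =====
def Claim_equal_track_changes : Prop := ∀ (old_words : List String) (new_words : List String), Dom_track_changes old_words new_words → Spec_track_changes old_words new_words (track_changes old_words new_words)

-- ===== LEMMAS AND PROOFS =====

-- every match produced from (i, j) lies strictly below (i, j) in both coordinates
theorem getLcsAux_bound (w1 w2 : List String) (dp : List (List Nat)) :
    ∀ i j, ∀ p ∈ getLcsAux w1 w2 dp i j, p.1 < i ∧ p.2 < j := by
  intro i j
  induction i, j using getLcsAux.induct w1 w2 dp with
  | case1 i j hEq ih =>
    intro p hp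
    rw [getLcsAux, if_pos hEq, List.mem_cons] at hp
    rcases hp with hp | hp
    · subst hp; omega
    · have := ih p hp; omega
  | case2 i j hEq hGt ih =>
    intro p hp
    rw [getLcsAux, if_neg hEq, if_pos hGt] at hp
    have := ih p hp; omega
  | case3 i j hEq hGt ih =>
    intro p hp
    rw [getLcsAux, if_neg hEq, if_neg hGt] at hp
    have := ih p hp; omega
  | case4 j =>
    intro p hp
    rw [getLcsAux] at hp
    simp at hp
  | case5 i =>
    intro p hp
    rw [getLcsAux] at hp
    simp at hp

-- the visit-order list is strictly decreasing in the first coordinate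
theorem getLcsAux_pairwise (w1 w2 : List String) (dp : List (List Nat)) :
    ∀ i j, (getLcsAux w1 w2 dp i j).Pairwise (fun a b => b.1 < a.1) := by
  intro i j
  induction i, j using getLcsAux.induct w1 w2 dp with
  | case1 i j hEq ih =>
    rw [getLcsAux, if_pos hEq]
    refine List.Pairwise.cons ?_ ih
    intro p hp
    exact (getLcsAux_bound w1 w2 dp i j p hp).1
  | case2 i j hEq hGt ih => rw [getLcsAux, if_neg hEq, if_pos hGt]; exact ih
  | case3 i j hEq hGt ih => rw [getLcsAux, if_neg hEq, if_neg hGt]; exact ih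
  | case4 j => rw [getLcsAux]; exact List.Pairwise.nil
  | case5 i => rw [getLcsAux]; exact List.Pairwise.nil

-- sorted(lcs) is the visit-order list reversed
theorem sorted_getLcsAux (w1 w2 : List String) (dp : List (List Nat)) (i j : Nat) :
    PySem.List.sorted (getLcsAux w1 w2 dp i j) (fun p => p.1) false
      = (getLcsAux w1 w2 dp i j).reverse := by
  apply PySem.List.sorted_eq_of_perm_of_pairwise_lt
  · exact (getLcsAux w1 w2 dp i j).reverse_perm
  · rw [List.pairwise_reverse]
    exact getLcsAux_pairwise w1 w2 dp i j

-- the heart: A's forward pass over the reversed match list plus the trailing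
-- segment equals B's walk (reversed), for any right boundary (ro, rn)
theorem fwd_eq_walk (w1 w2 : List String) (dp : List (List Nat)) :
    ∀ i j ro rn,
      (List.foldl fwdStep ([], 0, 0) (getLcsAux w1 w2 dp i j).reverse).1 ++
        (if (List.foldl fwdStep ([], 0, 0) (getLcsAux w1 w2 dp i j).reverse).2.1 < ro ∨
            (List.foldl fwdStep ([], 0, 0) (getLcsAux w1 w2 dp i j).reverse).2.2 < rn then
           [(((List.foldl fwdStep ([], 0, 0) (getLcsAux w1 w2 dp i j).reverse).2.1 : Int), (ro : Int),
             ((List.foldl fwdStep ([], 0, 0) (getLcsAux w1 w2 dp i j).reverse).2.2 : Int), (rn : Int))]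
         else [])
        = (walkEmit w1 w2 dp i j ro rn).reverse := by
  intro i j
  induction i, j using getLcsAux.induct w1 w2 dp with
  | case1 i j hEq ih =>
    intro ro rn
    rw [getLcsAux, if_pos hEq, walkEmit, if_pos hEq]
    simp only [List.reverse_cons, List.foldl_append, List.foldl_cons, List.foldl_nil,
      List.reverse_append]
    set st := List.foldl fwdStep ([], 0, 0) (getLcsAux w1 w2 dp i j).reverse with hst
    have hstep : fwdStep st (i, j)
        = (st.1 ++ (if st.2.1 < i ∨ st.2.2 < j then
             [((st.2.1 : Int), (i : Int), (st.2.2 : Int), (j : Int))] else []), i + 1, j + 1) := by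
      by_cases h : st.2.1 < i ∨ st.2.2 < j <;> simp [fwdStep, gt_iff_lt, h]
    rw [hstep]
    dsimp only
    rw [ih i j]
    split_ifs <;> simp
  | case2 i j hEq hGt ih =>
    intro ro rn
    rw [getLcsAux, if_neg hEq, if_pos hGt, walkEmit, if_neg hEq, if_pos hGt]
    exact ih ro rn
  | case3 i j hEq hGt ih =>
    intro ro rn
    rw [getLcsAux, if_neg hEq, if_neg hGt, walkEmit, if_neg hEq, if_neg hGt]
    exact ih ro rn
  | case4 j =>
    intro ro rn
    rw [getLcsAux, walkEmit]
    simp only [List.reverse_nil, List.foldl_nil]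
    split_ifs <;> simp
  | case5 i =>
    intro ro rn
    rw [getLcsAux, walkEmit]
    simp only [List.reverse_nil, List.foldl_nil]
    split_ifs <;> simp

-- ===== VERDICT (by name: the statement is the Claim_ definition above) =====
theorem track_changes_spec : Claim_equal_track_changes := by
  intro old_words new_words _
  unfold Spec_track_changes track_changes track_changes_alt
  simp only [sorted_getLcsAux]
  exact fwd_eq_walk old_words new_words (lcsMatrix old_words new_words)
    old_words.length new_words.length old_words.length new_words.length
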